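-- pv_equiv track=rewrite | github.com/BeiJielxc/json-repair-script | main.py | remove_stray_quote_after_number_token
-- ===== SOURCE A (Python) =====
-- from typing import Tuple, List
--
-- def remove_stray_quote_after_number_token(s: str) -> Tuple[str, List[str]]:
--     """
--     移除一种典型的截断/拼接残片：数字 token 后面紧跟一个多余的 `"`，例如 `...[2", ...` 或 `... 123" ]`。
--     这个 `"` 会把后续文本错误地带入字符串，造成连锁解析失败。
--
--     规则（仅在字符串之外生效）：
--     - 遇到 `"` 时，若其前一个非空白字符属于数字 token（0-9 或 token 内字符 .+-eE），
--       且该数字 token 的起始前一字符不是 `"`（避免误伤 `"123"` 这类合法字符串），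
--       且 `"` 后一个非空白字符是 `,` / `]` / `}`，则删除该 `"`。
--     """
--     diagnostics: List[str] = []
--     chars = list(s)
--     in_string = False
--     escape_next = False
--     removed = 0
--
--     def is_num_char(ch: str) -> bool:
--         return ch.isdigit() or ch in ".+-eE"
--
--     i = 0
--     while i < len(chars):
--         ch = chars[i]
--         if escape_next:
--             escape_next = False
--             i += 1
--             continue
--         if ch == "\\":
--             escape_next = True
--             i += 1
--             continue
--         if ch == '"':
--             if not in_string:
--                 # 可能是“数字后多余的引号”
--                 # 向左找前一个非空白字符
--                 k = i - 1
--                 while k >= 0 and chars[k] in " \t\r\n":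
--                     k -= 1
--                 if k >= 0 and is_num_char(chars[k]):
--                     # 找到数字 token 的起始
--                     start = k
--                     while start - 1 >= 0 and is_num_char(chars[start - 1]):
--                         start -= 1
--                     # token 起始前一个字符不能是引号（避免误伤字符串 "123"）
--                     prev = start - 1
--                     while prev >= 0 and chars[prev] in " \t\r\n":
--                         prev -= 1
--                     if prev < 0 or chars[prev] != '"':
--                         # 向右找后一个非空白字符
--                         j = i + 1
--                         while j < len(chars) and chars[j] in " \t\r\n":
--                             j += 1
--                         if j < len(chars) and chars[j] in ",]}":
--                             chars.pop(i)
--                             removed += 1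
--                             # 不递增 i，继续检查当前位置
--                             continue
--                 # 普通开引号
--                 in_string = True
--                 i += 1
--                 continue
--             else:
--                 in_string = False
--                 i += 1
--                 continue
--         i += 1
--
--     if removed:
--         diagnostics.append(f"removed {removed} stray quote(s) after number token")
--     return "".join(chars), diagnostics
-- ===== SOURCE B (Python) =====
-- from typing import Tuple, List
--
-- def remove_stray_quote_after_number_token(s: str) -> Tuple[str, List[str]]:
--     """Single forward pass with O(1) left-context state instead of in-place pops
--     and backward rescans at every quote."""
--     WS = " \t\r\n"
--
--     def is_num_char(ch: str) -> bool:
--         return ch.isdigit() or ch in ".+-eE"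
--
--     out: List[str] = []
--     removed = 0
--     in_string = False
--     escape_next = False
--     last_ns = None   # last emitted non-whitespace char
--     prev_em = None   # last emitted char
--     cbr = None       # last_ns captured when the current trailing number run began
--     n = len(s)
--     for i, ch in enumerate(s):
--         if escape_next:
--             escape_next = False
--         elif ch == "\\":
--             escape_next = True
--         elif ch == '"':
--             if not in_string:
--                 ok = last_ns is not None and is_num_char(last_ns) and (cbr is None or cbr != '"')
--                 if ok:
--                     j = i + 1
--                     while j < n and s[j] in WS:
--                         j += 1
--                     ok = j < n and s[j] in ",]}"
--                 if ok:
--                     removed += 1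
--                     continue  # drop the quote; emitted-context state untouched
--                 in_string = True
--             else:
--                 in_string = False
--         out.append(ch)
--         if is_num_char(ch) and (prev_em is None or not is_num_char(prev_em)):
--             cbr = last_ns
--         if ch not in WS:
--             last_ns = ch
--         prev_em = ch
--
--     diagnostics: List[str] = []
--     if removed:
--         diagnostics.append(f"removed {removed} stray quote(s) after number token")
--     return "".join(out), diagnostics
-- ===== Notes on version B (the rewrite author's own statement) =====
-- stated objective: alternative
-- what changed: B replaces A's in-place list mutation (pop) and the three backward scans performed at every quote by a single forward pass that maintains O(1) left-context state (last non-whitespace char, previous emitted char, and the char preceding the current number run), keeping only the same forward whitespace lookahead.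
import Mathlib
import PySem

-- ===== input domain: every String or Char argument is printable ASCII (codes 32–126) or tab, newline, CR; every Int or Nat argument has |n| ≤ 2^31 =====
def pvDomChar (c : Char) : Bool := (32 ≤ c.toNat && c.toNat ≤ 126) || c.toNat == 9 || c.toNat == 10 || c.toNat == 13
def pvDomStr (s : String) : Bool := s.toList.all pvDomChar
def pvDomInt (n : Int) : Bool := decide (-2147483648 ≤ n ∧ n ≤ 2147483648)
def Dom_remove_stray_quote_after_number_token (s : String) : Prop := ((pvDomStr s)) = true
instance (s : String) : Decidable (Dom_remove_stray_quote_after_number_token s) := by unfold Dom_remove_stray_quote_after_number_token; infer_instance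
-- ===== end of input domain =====

-- B replaces A's in-place pops and per-quote backward rescans by one forward pass with O(1)
-- left-context state (last non-space char, previous char, char before the current number run).

-- ===== PORT A =====
-- `ch.isdigit() or ch in ".+-eE"`; Char.isDigit is exact for the ASCII domain
def pvIsNumChar (c : Char) : Bool :=
  c.isDigit || c == '.' || c == '+' || c == '-' || c == 'e' || c == 'E'

-- `ch in " \t\r\n"`
def pvIsWs (c : Char) : Bool := c == ' ' || c == '\t' || c == '\r' || c == '\n'

-- `k = i - 1; while k >= 0 and chars[k] in " \t\r\n": k -= 1` (called with i; none = k reached -1)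
def pvFindPrevNonWs (chars : List Char) : Nat → Option Nat
  | 0 => none
  | k + 1 => if pvIsWs (chars.getD k ' ') then pvFindPrevNonWs chars k else some k

-- `start = k; while start - 1 >= 0 and is_num_char(chars[start - 1]): start -= 1`
def pvRunStart (chars : List Char) : Nat → Nat
  | 0 => 0
  | k + 1 => if pvIsNumChar (chars.getD k ' ') then pvRunStart chars k else k + 1

-- `j = i + 1; while j < len(chars) and chars[j] in " \t\r\n": j += 1` (none = ran off the end)
def pvFindNextNonWs (chars : List Char) (j : Nat) : Option Nat :=
  if j < chars.length then
    if pvIsWs (chars.getD j ' ') then pvFindNextNonWs chars (j + 1) else some j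
  else none
termination_by chars.length - j
decreasing_by omega

-- the `while i < len(chars)` loop, with `chars.pop(i)` as `eraseIdx`
def pvLoopA (chars : List Char) (i : Nat) (instr esc : Bool) (removed : Nat) : List Char × Nat :=
  if h : i < chars.length then
    let ch := chars.getD i ' '
    if esc then pvLoopA chars (i + 1) instr false removed
    else if ch == '\\' then pvLoopA chars (i + 1) instr true removed
    else if ch == '"' then
      if !instr then
        let pop : Bool :=
          match pvFindPrevNonWs chars i with
          | none => false
          | some k =>
            if pvIsNumChar (chars.getD k ' ') then
              let start := pvRunStart chars k
              let prevOk : Bool :=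
                match pvFindPrevNonWs chars start with
                | none => true
                | some p => !(chars.getD p ' ' == '"')
              if prevOk then
                match pvFindNextNonWs chars (i + 1) with
                | none => false
                | some j =>
                  (chars.getD j ' ' == ',') || (chars.getD j ' ' == ']') || (chars.getD j ' ' == '}')
              else false
            else false
        if pop then pvLoopA (chars.eraseIdx i) i instr esc (removed + 1)
        else pvLoopA chars (i + 1) true esc removed
      else pvLoopA chars (i + 1) false esc removed
    else pvLoopA chars (i + 1) instr esc removed
  else (chars, removed)
termination_by chars.length - i
decreasing_by
  all_goals (try simp [List.length_eraseIdx, h]); omega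

def remove_stray_quote_after_number_token (s : String) : String × List String :=
  let r := pvLoopA s.toList 0 false false 0
  let diagnostics : List String :=
    if r.2 ≠ 0 then
      ["removed " ++ PySem.Int.toStr (r.2 : Int) ++ " stray quote(s) after number token"]
    else []
  (String.mk r.1, diagnostics)

-- ===== PORT B =====
-- `j = i + 1; while j < n and s[j] in WS: j += 1; ok = j < n and s[j] in ",]}"` as a scan of the suffix
def pvNextNonWs : List Char → Option Char
  | [] => none
  | c :: r => if pvIsWs c then pvNextNonWs r else some c

-- `prev_em is None or not is_num_char(prev_em)` (negated)
def pvPrevNum (prevEm : Option Char) : Bool :=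
  match prevEm with | some p => pvIsNumChar p | none => false

-- single forward pass; acc holds the emitted chars in reverse
def pvLoopB (rest : List Char) (instr esc : Bool) (lastNS prevEm cbr : Option Char)
    (acc : List Char) (removed : Nat) : List Char × Nat :=
  match rest with
  | [] => (acc.reverse, removed)
  | c :: r =>
    let emit := fun (instr' esc' : Bool) =>
      let cbr' := if pvIsNumChar c && !(pvPrevNum prevEm) then lastNS else cbr
      let lastNS' := if pvIsWs c then lastNS else some c
      pvLoopB r instr' esc' lastNS' (some c) cbr' (c :: acc) removed
    if esc then emit instr false
    else if c == '\\' then emit instr true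
    else if c == '"' then
      if !instr then
        let ok := (match lastNS with | some l => pvIsNumChar l | none => false)
          && (match cbr with | some d => !(d == '"') | none => true)
          && (match pvNextNonWs r with | some d => (d == ',') || (d == ']') || (d == '}') | none => false)
        if ok then pvLoopB r instr esc lastNS prevEm cbr acc (removed + 1)
        else emit true esc
      else emit false esc
    else emit instr esc

def remove_stray_quote_after_number_token_alt (s : String) : String × List String :=
  let r := pvLoopB s.toList false false none none none [] 0
  let diagnostics : List String :=
    if r.2 ≠ 0 then
      ["removed " ++ PySem.Int.toStr (r.2 : Int) ++ " stray quote(s) after number token"]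
    else []
  (String.mk r.1, diagnostics)

-- ===== PRECONDITION & SPEC =====
def Spec_remove_stray_quote_after_number_token (s : String) (out : String × List String) : Prop := out = remove_stray_quote_after_number_token_alt s
instance (s : String) (out : String × List String) : Decidable (Spec_remove_stray_quote_after_number_token s out) := by unfold Spec_remove_stray_quote_after_number_token; infer_instance

-- ===== CLAIM (what is proved, stated in full; the proofs are below) =====
def Claim_equal_remove_stray_quote_after_number_token : Prop := ∀ (s : String), Dom_remove_stray_quote_after_number_token s → Spec_remove_stray_quote_after_number_token s (remove_stray_quote_after_number_token s)

-- ===== LEMMAS AND PROOFS =====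

lemma pvGetD_append (xs : List Char) (c : Char) (r : List Char) :
    (xs ++ c :: r).getD xs.length ' ' = c := by
  induction xs with
  | nil => rfl
  | cons x t ih => simpa using ih

lemma pvEraseIdx_append (xs : List Char) (c : Char) (r : List Char) :
    (xs ++ c :: r).eraseIdx xs.length = xs ++ r := by
  induction xs with
  | nil => rfl
  | cons x t ih => simpa using ih

lemma pvWs_not_num (c : Char) (h : pvIsWs c = true) : pvIsNumChar c = false := by
  simp only [pvIsWs, Bool.or_eq_true, beq_iff_eq] at h
  rcases h with ((h | h) | h) | h <;> subst h <;> decide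

-- characterisation of A's backward non-whitespace scan on a reversed prefix
lemma pvFindPrev_rev (r : List Char) : ∀ suf : List Char,
    pvFindPrevNonWs (r.reverse ++ suf) r.length =
      (match r.dropWhile pvIsWs with
       | [] => none
       | _ :: t => some t.length) := by
  induction r with
  | nil => intro suf; rfl
  | cons c t ih =>
    intro suf
    have e : (c :: t).reverse ++ suf = t.reverse ++ (c :: suf) := by simp
    have hget : (t.reverse ++ (c :: suf)).getD t.length ' ' = c := by
      simpa using pvGetD_append t.reverse c suf
    show pvFindPrevNonWs ((c :: t).reverse ++ suf) (t.length + 1) = _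
    rw [e, pvFindPrevNonWs, hget]
    by_cases hw : pvIsWs c = true
    · simp [hw, ih (c :: suf), List.dropWhile_cons]
    · simp [hw, List.dropWhile_cons]

-- characterisation of A's number-run backward scan on a reversed prefix
lemma pvRunStart_rev (t : List Char) : ∀ suf : List Char,
    pvRunStart (t.reverse ++ suf) t.length = (t.dropWhile pvIsNumChar).length := by
  induction t with
  | nil => intro suf; rfl
  | cons d t2 ih =>
    intro suf
    have e : (d :: t2).reverse ++ suf = t2.reverse ++ (d :: suf) := by simp
    have hget : (t2.reverse ++ (d :: suf)).getD t2.length ' ' = d := by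
      simpa using pvGetD_append t2.reverse d suf
    show pvRunStart ((d :: t2).reverse ++ suf) (t2.length + 1) = _
    rw [e, pvRunStart, hget]
    by_cases hn : pvIsNumChar d = true
    · simp [hn, ih (d :: suf), List.dropWhile_cons]
    · simp [hn, List.dropWhile_cons]

-- A's forward lookahead over a suffix equals B's pvNextNonWs test
lemma pvFindNext_rev (rest : List Char) : ∀ xs : List Char,
    (match pvFindNextNonWs (xs ++ rest) xs.length with
     | none => false
     | some j =>
       ((xs ++ rest).getD j ' ' == ',') || ((xs ++ rest).getD j ' ' == ']') ||
         ((xs ++ rest).getD j ' ' == '}'))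
    = (match pvNextNonWs rest with
       | none => false
       | some d => (d == ',') || (d == ']') || (d == '}')) := by
  induction rest with
  | nil =>
    intro xs
    rw [pvFindNextNonWs]
    simp [pvNextNonWs]
  | cons d r2 ih =>
    intro xs
    rw [pvFindNextNonWs]
    have hlt : xs.length < (xs ++ d :: r2).length := by simp
    have hget : (xs ++ d :: r2).getD xs.length ' ' = d := pvGetD_append xs d r2
    rw [if_pos hlt, hget]
    by_cases hw : pvIsWs d = true
    · have e : xs ++ d :: r2 = (xs ++ [d]) ++ r2 := by simp
      have e2 : xs.length + 1 = (xs ++ [d]).length := by simp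
      rw [hw, if_pos rfl, e, e2, ih (xs ++ [d])]
      simp [pvNextNonWs, hw]
    · simp [hw, pvNextNonWs]

-- invariant tying B's O(1) state to the emitted prefix (in reverse)
def pvInv (racc : List Char) (lastNS prevEm cbr : Option Char) : Prop :=
  prevEm = racc.head?
  ∧ lastNS = (racc.dropWhile pvIsWs).head?
  ∧ (∀ c, lastNS = some c → pvIsNumChar c = true →
      cbr = (((racc.dropWhile pvIsWs).dropWhile pvIsNumChar).dropWhile pvIsWs).head?)

lemma pvInv_step (racc : List Char) (lastNS prevEm cbr : Option Char) (c : Char)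
    (h : pvInv racc lastNS prevEm cbr) :
    pvInv (c :: racc)
      (if pvIsWs c then lastNS else some c)
      (some c)
      (if pvIsNumChar c && !(pvPrevNum prevEm) then lastNS else cbr) := by
  obtain ⟨h1, h2, h3⟩ := h
  by_cases hw : pvIsWs c = true
  · have hn : pvIsNumChar c = false := pvWs_not_num c hw
    refine ⟨by simp, ?_, ?_⟩
    · simp [List.dropWhile_cons, hw, h2]
    · intro c' hc' hnum
      simp only [hn, Bool.false_and, if_false]
      rw [h3 c' (by simpa [hw] using hc') hnum]
      simp [List.dropWhile_cons, hw]
  · refine ⟨by simp, by simp [List.dropWhile_cons, hw], ?_⟩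
    intro c' hc' hnum
    simp only [hw, if_false] at hc'
    obtain rfl : c = c' := by simpa using hc'
    simp only [List.dropWhile_cons, hw, if_false, hnum, if_true]
    cases hracc : racc with
    | nil =>
      subst hracc
      have hpe : prevEm = none := by simpa using h1
      simp [hpe, pvPrevNum, hnum, h2]
    | cons p racc' =>
      subst hracc
      have hpe : prevEm = some p := by simpa using h1
      rw [hpe]
      by_cases hp : pvIsNumChar p = true
      · -- run continues: cbr kept
        have hpw : pvIsWs p = false := by
          by_contra hc
          have := pvWs_not_num p (by revert hc; cases pvIsWs p <;> simp)
          simp [this] at hp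
        have hlp : lastNS = some p := by simpa [List.dropWhile_cons, hpw] using h2
        rw [h3 p hlp hp]
        simp [pvPrevNum, hp, hpw, hnum, List.dropWhile_cons]
      · -- new run starts: cbr := lastNS
        simp [pvPrevNum, hp, hnum, List.dropWhile_cons, h2]

-- main simulation: A on (emitted prefix ++ rest) at index |prefix| equals B on rest with the state
lemma pvMain (rest : List Char) : ∀ (racc : List Char) (instr esc : Bool)
    (lastNS prevEm cbr : Option Char) (removed : Nat),
    pvInv racc lastNS prevEm cbr →
    pvLoopA (racc.reverse ++ rest) racc.length instr esc removed
      = pvLoopB rest instr esc lastNS prevEm cbr racc removed := by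
  induction rest with
  | nil =>
    intro racc instr esc lastNS prevEm cbr removed _h
    rw [pvLoopA]
    simp [pvLoopB]
  | cons c r ih =>
    intro racc instr esc lastNS prevEm cbr removed h
    have hinv := h
    obtain ⟨h1, h2, h3⟩ := h
    have hlt : racc.length < (racc.reverse ++ c :: r).length := by simp
    have hch : (racc.reverse ++ c :: r).getD racc.length ' ' = c := by
      simpa using pvGetD_append racc.reverse c r
    have hemit : ∀ instr' esc' : Bool,
        pvLoopA (racc.reverse ++ c :: r) (racc.length + 1) instr' esc' removed
          = pvLoopB r instr' esc'
              (if pvIsWs c then lastNS else some c) (some c)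
              (if pvIsNumChar c && !(pvPrevNum prevEm) then lastNS else cbr)
              (c :: racc) removed := by
      intro instr' esc'
      have e : racc.reverse ++ c :: r = (c :: racc).reverse ++ r := by simp
      have e2 : racc.length + 1 = (c :: racc).length := rfl
      rw [e, e2]
      exact ih (c :: racc) instr' esc' _ _ _ removed (pvInv_step racc lastNS prevEm cbr c hinv)
    rw [pvLoopA, dif_pos hlt]
    simp only [hch]
    conv_rhs => rw [pvLoopB.eq_def]
    simp only []
    cases esc with
    | true => simpa using hemit instr false
    | false =>
      simp only [if_neg (by simp : ¬ (false = true))]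
      by_cases hbs : (c == '\\') = true
      · rw [if_pos hbs, if_pos hbs]
        simpa using hemit instr true
      · rw [if_neg hbs, if_neg hbs]
        by_cases hq : (c == '"') = true
        · rw [if_pos hq, if_pos hq]
          obtain rfl : c = '"' := by simpa using hq
          cases instr with
          | true =>
            simp only [Bool.not_true, if_neg (by simp : ¬ (false = true))]
            simpa using hemit false false
          | false =>
            simp only [Bool.not_false, if_pos rfl]
            -- show A's pop condition equals B's ok condition
            have hprev := pvFindPrev_rev racc ('"' :: r)
            have hnext :
                (match pvFindNextNonWs (racc.reverse ++ '"' :: r) (racc.length + 1) with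
                 | none => false
                 | some j =>
                   ((racc.reverse ++ '"' :: r).getD j ' ' == ',') ||
                     ((racc.reverse ++ '"' :: r).getD j ' ' == ']') ||
                     ((racc.reverse ++ '"' :: r).getD j ' ' == '}'))
                = (match pvNextNonWs r with
                   | none => false
                   | some d => (d == ',') || (d == ']') || (d == '}')) := by
              have e : racc.reverse ++ '"' :: r = (racc.reverse ++ ['"']) ++ r := by simp
              have e2 : racc.length + 1 = (racc.reverse ++ ['"']).length := by simp
              rw [e, e2]
              exact pvFindNext_rev r (racc.reverse ++ ['"'])
            match hdw : racc.dropWhile pvIsWs with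
            | [] =>
              have hlns : lastNS = none := by rw [h2, hdw]; rfl
              rw [hprev]
              simpa [hdw, hlns] using hemit true false
            | c0 :: t =>
              have hlns : lastNS = some c0 := by rw [h2, hdw]; rfl
              have hre : racc.reverse ++ '"' :: r
                  = t.reverse ++ (c0 :: ((racc.takeWhile pvIsWs).reverse ++ '"' :: r)) := by
                conv_lhs => rw [← List.takeWhile_append_dropWhile (p := pvIsWs) (l := racc), hdw]
                simp
              have hc0 : (racc.reverse ++ '"' :: r).getD t.length ' ' = c0 := by
                rw [hre]; simpa using pvGetD_append t.reverse c0 _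
              rw [hprev]
              simp only [hdw, hlns]
              by_cases hn : pvIsNumChar c0 = true
              · simp only [hn, if_pos rfl, hc0]
                have hrun : pvRunStart (racc.reverse ++ '"' :: r) t.length
                    = (t.dropWhile pvIsNumChar).length := by
                  rw [hre]; exact pvRunStart_rev t _
                have hre2 : racc.reverse ++ '"' :: r
                    = (t.dropWhile pvIsNumChar).reverse ++
                        ((t.takeWhile pvIsNumChar).reverse ++
                          (c0 :: ((racc.takeWhile pvIsWs).reverse ++ '"' :: r))) := by
                  rw [hre, show t.reverse
                        = (t.dropWhile pvIsNumChar).reverse ++ (t.takeWhile pvIsNumChar).reverse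
                      from by rw [← List.reverse_append, List.takeWhile_append_dropWhile]]
                  simp
                have hprev2 := by
                  have := pvFindPrev_rev (t.dropWhile pvIsNumChar)
                    ((t.takeWhile pvIsNumChar).reverse ++
                      (c0 :: ((racc.takeWhile pvIsWs).reverse ++ '"' :: r)))
                  rw [← hre2] at this
                  exact this
                have hcbr : cbr = ((t.dropWhile pvIsNumChar).dropWhile pvIsWs).head? := by
                  rw [h3 c0 hlns hn, hdw]
                  have hc0w : pvIsWs c0 = false := by
                    by_contra hc
                    have := pvWs_not_num c0 (by revert hc; cases pvIsWs c0 <;> simp)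
                    simp [this] at hn
                  simp [List.dropWhile_cons, hc0w, hn]
                rw [hrun, hprev2]
                match hdw2 : (t.dropWhile pvIsNumChar).dropWhile pvIsWs with
                | [] =>
                  have hcbrn : cbr = none := by rw [hcbr, hdw2]; rfl
                  rw [hnext]
                  match hnn : pvNextNonWs r with
                  | none => simpa [hnn, hdw, hlns, hcbrn] using hemit true false
                  | some d =>
                    by_cases hd : ((d == ',') || (d == ']') || (d == '}')) = true
                    · have herase : (racc.reverse ++ '"' :: r).eraseIdx racc.length
                          = racc.reverse ++ r := by
                        simpa using pvEraseIdx_append racc.reverse '"' r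
                      simp only [hnn, hcbrn, hd, herase]
                      simpa [hlns, hcbrn] using
                        ih racc false false lastNS prevEm cbr (removed + 1) hinv
                    · simpa [hd, hnn, hdw, hlns, hcbrn] using hemit true false
                | d0 :: t3 =>
                  have hcbrd : cbr = some d0 := by rw [hcbr, hdw2]; rfl
                  have hre3 : racc.reverse ++ '"' :: r = t3.reverse ++
                      (d0 :: (((t.dropWhile pvIsNumChar).takeWhile pvIsWs).reverse ++
                        ((t.takeWhile pvIsNumChar).reverse ++
                          (c0 :: ((racc.takeWhile pvIsWs).reverse ++ '"' :: r))))) := by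
                    rw [hre2, show (t.dropWhile pvIsNumChar).reverse
                          = (t3.reverse ++ [d0]) ++
                              ((t.dropWhile pvIsNumChar).takeWhile pvIsWs).reverse
                        from by
                          conv_lhs =>
                            rw [← List.takeWhile_append_dropWhile (p := pvIsWs)
                                  (l := t.dropWhile pvIsNumChar)]
                          rw [hdw2]
                          simp]
                    simp
                  have hd0 : (racc.reverse ++ '"' :: r).getD t3.length ' ' = d0 := by
                    rw [hre3]; simpa using pvGetD_append t3.reverse d0 _
                  simp only [hd0]
                  by_cases hdq : (d0 == '"') = true
                  · simpa [hdq, hdw, hlns, hcbrd] using hemit true false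
                  · rw [hnext]
                    match hnn : pvNextNonWs r with
                    | none => simpa [hnn, hdq, hdw, hlns, hcbrd] using hemit true false
                    | some d =>
                      by_cases hd : ((d == ',') || (d == ']') || (d == '}')) = true
                      · have herase : (racc.reverse ++ '"' :: r).eraseIdx racc.length
                            = racc.reverse ++ r := by
                          simpa using pvEraseIdx_append racc.reverse '"' r
                        simp only [hnn, hcbrd, hd, hdq, herase]
                        simpa [hlns, hcbrd, hdq, hd] using
                          ih racc false false lastNS prevEm cbr (removed + 1) hinv
                      · simpa [hd, hnn, hdq, hdw, hlns, hcbrd] using hemit true false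
              · have hc0' : (racc.reverse ++ '"' :: r)[t.length]?.getD ' ' = c0 := hc0
                simpa [hc0', hn, hdw, hlns] using hemit true false
        · rw [if_neg hq, if_neg hq]
          simpa using hemit instr false

-- ===== VERDICT (by name: the statement is the Claim_ definition above) =====
theorem remove_stray_quote_after_number_token_spec : Claim_equal_remove_stray_quote_after_number_token := by
  intro s _hD
  show _ = _
  unfold remove_stray_quote_after_number_token remove_stray_quote_after_number_token_alt
  have := pvMain s.toList [] false false none none none 0 ⟨rfl, rfl, by intro c hc; simp at hc⟩
  simp only [List.reverse_nil, List.nil_append, List.length_nil] at this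
  rw [this]
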